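-- pv_equiv track=rewrite | github.com/liuyingxuvka/FlowPilot | simulations/run_capability_checks.py | _reverse_reachable
-- ===== SOURCE A (Python) =====
-- from collections import deque
--
-- def _reverse_reachable(edges: list[list[int]], starts: set[int]) -> set[int]:
--     reverse: list[list[int]] = [[] for _ in edges]
--     for source, outgoing in enumerate(edges):
--         for target in outgoing:
--             reverse[target].append(source)
--     reachable = set(starts)
--     queue: deque[int] = deque(starts)
--     while queue:
--         target = queue.popleft()
--         for source in reverse[target]:
--             if source not in reachable:
--                 reachable.add(source)
--                 queue.append(source)
--     return reachable
-- ===== SOURCE B (Python) =====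
-- def _reverse_reachable(edges: list[list[int]], starts: set[int]) -> set[int]:
--     # Fixpoint relaxation: no reverse adjacency list, no queue.  live[w] says whether
--     # node w is referred to by some already-reachable value (references may be negative:
--     # Python list indexing, exactly as A's reverse[target]).  Repeatedly sweep the forward
--     # edge list, pulling in any source one of whose targets is live, until a sweep
--     # changes nothing.
--     reachable = set(starts)
--     live = [False] * len(edges)
--     for s in starts:
--         live[s] = True
--     changed = True
--     while changed:
--         changed = False
--         for source, outgoing in enumerate(edges):
--             if source not in reachable and any(live[t] for t in outgoing):
--                 reachable.add(source)
--                 live[source] = True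
--                 changed = True
--     return reachable
-- ===== Notes on version B (the rewrite author's own statement) =====
-- stated objective: alternative
-- what changed: Replaced the reverse-adjacency-list construction plus BFS worklist by a fixpoint relaxation: a boolean 'live' node array is seeded from the starts, then the forward edge list is swept repeatedly, pulling in any source whose edge hits a live node, until a sweep changes nothing.
import Mathlib
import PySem

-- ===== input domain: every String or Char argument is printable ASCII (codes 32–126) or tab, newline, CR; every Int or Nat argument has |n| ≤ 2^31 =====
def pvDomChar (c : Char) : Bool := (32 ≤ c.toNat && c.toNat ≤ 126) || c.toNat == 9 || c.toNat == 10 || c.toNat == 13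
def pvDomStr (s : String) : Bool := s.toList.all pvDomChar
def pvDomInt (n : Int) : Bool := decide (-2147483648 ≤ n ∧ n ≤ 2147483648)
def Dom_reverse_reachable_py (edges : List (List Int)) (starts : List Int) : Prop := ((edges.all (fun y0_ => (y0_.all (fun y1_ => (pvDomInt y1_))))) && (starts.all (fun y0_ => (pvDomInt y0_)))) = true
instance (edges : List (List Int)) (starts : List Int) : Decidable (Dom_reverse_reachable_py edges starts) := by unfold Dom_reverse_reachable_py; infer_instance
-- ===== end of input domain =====

-- B replaces the reverse-adjacency-list + BFS worklist of A by a fixpoint relaxation that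
-- repeatedly sweeps the forward edge list until nothing changes (objective: alternative).
-- The Python function returns a set (unordered); both ports return its elements in ascending
-- order, so equality of the ports' lists is equality of the Python sets.

-- ===== PORT A =====
-- reverse[target].append(source) over enumerate(edges); pySetD/pyGetD are exact for the
-- in-range (possibly negative, Python-style) indices Pre_ admits (outside [-n,n) Python
-- raises IndexError).
def pvRevA (edges : List (List Int)) : List (List Int) :=
  (PySem.List.enumerate edges).foldl
    (fun rev p =>
      p.2.foldl (fun rev t =>
        PySem.List.pySetD rev t (PySem.List.pyGetD rev t [] ++ [p.1])) rev)
    (edges.map (fun _ => []))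

-- the while-queue loop; fuel 'starts.length + edges.length + 1' always suffices on Pre_
-- (each pop consumes one queue element, at most edges.length elements are ever appended),
-- proved in the lemmas below — the fuel guard only makes the same computation total.
def pvBfsA (rev : List (List Int)) : Nat → List Int → List Int → List Int
  | 0, reachable, _ => reachable
  | fuel+1, reachable, queue =>
    match queue with
    | [] => reachable
    | t :: rest =>
      let st := (PySem.List.pyGetD rev t []).foldl
        (fun (st : List Int × List Int) s =>
          if s ∈ st.1 then st else (st.1 ++ [s], st.2 ++ [s])) (reachable, rest)
      pvBfsA rev fuel st.1 st.2

def reverse_reachable_py (edges : List (List Int)) (starts : List Int) : List Int :=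
  let rev := pvRevA edges
  let reachable := PySem.Set.ofList starts
  PySem.List.sorted (pvBfsA rev (starts.length + edges.length + 1) reachable starts)
    (fun x => x) false

-- ===== PORT B =====
-- one full sweep over enumerate(edges); state ((reachable, live), changed); live is the
-- boolean node array Source B indexes Python-style (pyGetD/pySetD are exact on the in-range
-- indices on which Source B returns; out of range Source B raises IndexError like A)
def pvPassB (edges : List (List Int)) (st : (List Int × List Bool) × Bool) :
    (List Int × List Bool) × Bool :=
  (PySem.List.enumerate edges).foldl
    (fun st p =>
      if p.1 ∉ st.1.1 ∧ ∃ t ∈ p.2, PySem.List.pyGetD st.1.2 t false = true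
      then ((st.1.1 ++ [p.1], PySem.List.pySetD st.1.2 p.1 true), true) else st) st

-- 'while changed' loop; fuel 'edges.length + 1' always suffices (every changing sweep adds
-- at least one of the edges.length sources), proved below.
def pvLoopB (edges : List (List Int)) : Nat → List Int × List Bool → List Int
  | 0, st => st.1
  | fuel+1, st =>
    let st' := pvPassB edges (st, false)
    if st'.2 then pvLoopB edges fuel st'.1 else st'.1.1

def reverse_reachable_py_alt (edges : List (List Int)) (starts : List Int) : List Int :=
  let live := starts.foldl (fun lv s => PySem.List.pySetD lv s true)
    (List.replicate edges.length false)
  PySem.List.sorted (pvLoopB edges (edges.length + 1) (PySem.Set.ofList starts, live))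
    (fun x => x) false

-- ===== PRECONDITION & SPEC =====
-- Pre_ is exactly A's return domain: every edge target and every start is an in-range
-- Python index -n ≤ v < n of the node list (n = len(edges)); outside it A raises IndexError.
def Pre_reverse_reachable_py (edges : List (List Int)) (starts : List Int) : Prop :=
  (∀ l ∈ edges, ∀ t ∈ l, -(edges.length : Int) ≤ t ∧ t < (edges.length : Int)) ∧
  (∀ s ∈ starts, -(edges.length : Int) ≤ s ∧ s < (edges.length : Int))
instance (edges : List (List Int)) (starts : List Int) : Decidable (Pre_reverse_reachable_py edges starts) := by unfold Pre_reverse_reachable_py; infer_instance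

def pvWitness_reverse_reachable_py : List (List Int) × List Int := ([[1], [-2], []], [1])

def Spec_reverse_reachable_py (edges : List (List Int)) (starts : List Int) (out : List Int) : Prop := out = reverse_reachable_py_alt edges starts
instance (edges : List (List Int)) (starts : List Int) (out : List Int) : Decidable (Spec_reverse_reachable_py edges starts out) := by unfold Spec_reverse_reachable_py; infer_instance

-- ===== CLAIM (what is proved, stated in full; the proofs are below) =====
def Claim_equal_reverse_reachable_py : Prop := ∀ (edges : List (List Int)) (starts : List Int), Dom_reverse_reachable_py edges starts → Pre_reverse_reachable_py edges starts → Spec_reverse_reachable_py edges starts (reverse_reachable_py edges starts)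

-- ===== LEMMAS AND PROOFS =====

-- a Python-style node reference resolved to its node id
def pvNode (n : Nat) (v : Int) : Int := if v < 0 then v + n else v

-- the reverse-reachability closure both programs compute: u is pulled in when one of its
-- targets refers (as a Python index) to the same node as an already-reached value
inductive pvReach (edges : List (List Int)) (starts : List Int) : Int → Prop
  | base {s : Int} : s ∈ starts → pvReach edges starts s
  | step {u : Nat} {t x : Int} (hu : u < edges.length) (ht : t ∈ edges[u])
      (heq : pvNode edges.length t = pvNode edges.length x)
      (h : pvReach edges starts x) : pvReach edges starts ((u : Nat) : Int)

theorem pvReach_range {edges : List (List Int)} {starts : List Int}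
    (hPre : Pre_reverse_reachable_py edges starts) {x : Int}
    (h : pvReach edges starts x) :
    -(edges.length : Int) ≤ x ∧ x < (edges.length : Int) := by
  induction h with
  | base hs => exact hPre.2 _ hs
  | @step u t x hu ht heq _ _ =>
    constructor
    · omega
    · exact_mod_cast hu

theorem pvNode_range (n : Nat) (i : Int) (h0 : -(n : Int) ≤ i) (h1 : i < (n : Int)) :
    0 ≤ pvNode n i ∧ pvNode n i < (n : Int) := by
  unfold pvNode; split <;> omega

theorem pvNode_natCast (n u : Nat) : pvNode n ((u : Nat) : Int) = (u : Int) := by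
  unfold pvNode; split <;> omega

theorem pvNode_toNat_lt (n : Nat) (i : Int) (h0 : -(n : Int) ≤ i) (h1 : i < (n : Int)) :
    (pvNode n i).toNat < n := by
  unfold pvNode; split <;> omega

-- pyIdx? / pyGetD / pySetD at an in-range Python index, through the resolved node id
theorem pvIdx_node (n : Nat) (i : Int) (h0 : -(n : Int) ≤ i) (h1 : i < (n : Int)) :
    PySem.List.pyIdx? n i = some (pvNode n i).toNat := by
  unfold PySem.List.pyIdx? pvNode
  by_cases hi : 0 ≤ i
  · rw [if_pos hi, if_pos h1, if_neg (by omega : ¬ i < 0)]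
  · rw [if_neg hi, if_pos h0, if_pos (by omega : i < 0)]
    congr 1
    omega

theorem pvPyGetD_node {α : Type} (xs : List α) (i : Int) (d : α)
    (h0 : -(xs.length : Int) ≤ i) (h1 : i < (xs.length : Int)) :
    PySem.List.pyGetD xs i d = xs.getD (pvNode xs.length i).toNat d := by
  unfold PySem.List.pyGetD PySem.List.pyGet?
  rw [pvIdx_node _ _ h0 h1, List.getD_eq_getElem?_getD]
  rfl

theorem pvPySetD_node {α : Type} (xs : List α) (i : Int) (v : α)
    (h0 : -(xs.length : Int) ≤ i) (h1 : i < (xs.length : Int)) :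
    PySem.List.pySetD xs i v = xs.set (pvNode xs.length i).toNat v := by
  unfold PySem.List.pySetD PySem.List.pySet?
  rw [pvIdx_node _ _ h0 h1]
  rfl

theorem pvGetD_set {α : Type} (xs : List α) (k w : Nat) (v d : α) (hk : k < xs.length) :
    (xs.set k v).getD w d = if w = k then v else xs.getD w d := by
  by_cases hw : w = k
  · subst hw
    simp [List.getD_eq_getElem?_getD, hk]
  · rw [List.getD_eq_getElem?_getD, List.getD_eq_getElem?_getD, List.getElem?_set,
      if_neg (by omega : ¬ k = w), if_neg hw]

-- ---- the reverse adjacency list of port A ----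

theorem pvRevA_inner_len (src : Int) (ts : List Int) (rev : List (List Int)) :
    (ts.foldl (fun rev t =>
      PySem.List.pySetD rev t (PySem.List.pyGetD rev t [] ++ [src])) rev).length
    = rev.length := by
  induction ts generalizing rev with
  | nil => rfl
  | cons t ts ih => simp [List.foldl_cons, ih, PySem.List.length_pySetD]

theorem pvRevA_outer_len (ps : List (Int × List Int)) (rev : List (List Int)) :
    (ps.foldl (fun rev p =>
      p.2.foldl (fun rev t =>
        PySem.List.pySetD rev t (PySem.List.pyGetD rev t [] ++ [p.1])) rev) rev).length
    = rev.length := by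
  induction ps generalizing rev with
  | nil => rfl
  | cons p ps ih => simp [List.foldl_cons, ih, pvRevA_inner_len]

theorem pvRevA_inner_mem (src s : Int) : ∀ (ts : List Int) (rev : List (List Int)),
    (∀ t' ∈ ts, -(rev.length : Int) ≤ t' ∧ t' < (rev.length : Int)) →
    ∀ (w : Nat), w < rev.length →
    (s ∈ (ts.foldl (fun rev t =>
        PySem.List.pySetD rev t (PySem.List.pyGetD rev t [] ++ [src])) rev).getD w []
      ↔ s ∈ rev.getD w [] ∨ (s = src ∧ ∃ t' ∈ ts, (pvNode rev.length t').toNat = w)) := by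
  intro ts
  induction ts with
  | nil => intro rev _ w _; simp
  | cons t0 ts ih =>
    intro rev hts w hw
    have ht0 := hts t0 (by simp)
    have hw0 : (pvNode rev.length t0).toNat < rev.length :=
      pvNode_toNat_lt _ _ ht0.1 ht0.2
    have hset : PySem.List.pySetD rev t0 (PySem.List.pyGetD rev t0 [] ++ [src])
        = rev.set (pvNode rev.length t0).toNat (rev.getD (pvNode rev.length t0).toNat [] ++ [src]) := by
      rw [pvPySetD_node _ _ _ ht0.1 ht0.2, pvPyGetD_node _ _ _ ht0.1 ht0.2]
    have hlen : (rev.set (pvNode rev.length t0).toNat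
        (rev.getD (pvNode rev.length t0).toNat [] ++ [src])).length = rev.length := by
      simp
    rw [List.foldl_cons, hset,
      ih _ (fun t' ht' => by rw [hlen]; exact hts t' (by simp [ht'])) w (by omega),
      hlen, pvGetD_set _ _ _ _ _ hw0]
    by_cases he : w = (pvNode rev.length t0).toNat
    · subst he
      rw [if_pos rfl]
      simp only [List.mem_append, List.mem_cons]
      constructor
      · rintro ((h | h) | ⟨rfl, t', ht', hw'⟩)
        · exact Or.inl h
        · exact Or.inr ⟨by simpa using h, t0, Or.inl rfl, rfl⟩
        · exact Or.inr ⟨rfl, t', Or.inr ht', hw'⟩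
      · rintro (h | ⟨rfl, t', (rfl | ht'), hw'⟩)
        · exact Or.inl (Or.inl h)
        · exact Or.inl (Or.inr (by simp))
        · exact Or.inr ⟨rfl, t', ht', hw'⟩
    · rw [if_neg he]
      simp only [List.mem_cons]
      constructor
      · rintro (h | ⟨rfl, t', ht', hw'⟩)
        · exact Or.inl h
        · exact Or.inr ⟨rfl, t', Or.inr ht', hw'⟩
      · rintro (h | ⟨rfl, t', (rfl | ht'), hw'⟩)
        · exact Or.inl h
        · exact absurd hw'.symm he
        · exact Or.inr ⟨rfl, t', ht', hw'⟩

theorem pvRevA_outer_mem (s : Int) : ∀ (ps : List (Int × List Int)) (rev : List (List Int)),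
    (∀ p ∈ ps, ∀ t' ∈ p.2, -(rev.length : Int) ≤ t' ∧ t' < (rev.length : Int)) →
    ∀ (w : Nat), w < rev.length →
    (s ∈ (ps.foldl (fun rev p =>
        p.2.foldl (fun rev t =>
          PySem.List.pySetD rev t (PySem.List.pyGetD rev t [] ++ [p.1])) rev) rev).getD w []
      ↔ s ∈ rev.getD w [] ∨ ∃ p ∈ ps, s = p.1 ∧ ∃ t' ∈ p.2, (pvNode rev.length t').toNat = w) := by
  intro ps
  induction ps with
  | nil => intro rev _ w _; simp
  | cons p ps ih =>
    intro rev hps w hw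
    have hlen := pvRevA_inner_len p.1 p.2 rev
    rw [List.foldl_cons,
      ih _ (fun q hq t' ht' => by rw [hlen]; exact hps q (by simp [hq]) t' ht') w
        (by rw [hlen]; omega),
      hlen, pvRevA_inner_mem p.1 s p.2 rev (hps p (by simp)) w hw]
    simp only [List.mem_cons]
    constructor
    · rintro ((h | ⟨rfl, t', ht', hw'⟩) | ⟨q, hq, rfl, t', ht', hw'⟩)
      · exact Or.inl h
      · exact Or.inr ⟨p, Or.inl rfl, rfl, t', ht', hw'⟩
      · exact Or.inr ⟨q, Or.inr hq, rfl, t', ht', hw'⟩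
    · rintro (h | ⟨q, (rfl | hq), rfl, t', ht', hw'⟩)
      · exact Or.inl (Or.inl h)
      · exact Or.inl (Or.inr ⟨rfl, t', ht', hw'⟩)
      · exact Or.inr ⟨q, hq, rfl, t', ht', hw'⟩

theorem pvRevA_mem {edges : List (List Int)} {starts : List Int}
    (hPre : Pre_reverse_reachable_py edges starts)
    (t : Int) (h0 : -(edges.length : Int) ≤ t) (h1 : t < (edges.length : Int)) (s : Int) :
    (s ∈ PySem.List.pyGetD (pvRevA edges) t []
      ↔ ∃ (u : Nat) (hu : u < edges.length), s = (u : Int) ∧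
          ∃ t' ∈ edges[u], pvNode edges.length t' = pvNode edges.length t) := by
  have hlen0 : (edges.map (fun _ => ([] : List Int))).length = edges.length := by simp
  have hlenR : (pvRevA edges).length = edges.length := by
    rw [pvRevA, pvRevA_outer_len, hlen0]
  rw [pvPyGetD_node _ _ _ (by omega) (by omega), hlenR, pvRevA]
  have hw : (pvNode edges.length t).toNat < edges.length := pvNode_toNat_lt _ _ h0 h1
  rw [pvRevA_outer_mem s _ _
    (fun p hp t' ht' => by
      rw [hlen0]
      obtain ⟨k, hk, rfl⟩ := (PySem.List.mem_enumerate_iff _ _ _).1 hp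
      exact hPre.1 _ (List.getElem_mem hk) t' ht')
    (pvNode edges.length t).toNat (by rw [hlen0]; exact hw)]
  have hbase : (edges.map (fun _ => ([] : List Int))).getD (pvNode edges.length t).toNat []
      = [] := by
    rw [List.getD_eq_getElem?_getD, List.getElem?_map,
      List.getElem?_eq_getElem (by omega : (pvNode edges.length t).toNat < edges.length)]
    simp
  rw [hbase, hlen0]
  simp only [List.not_mem_nil, false_or]
  constructor
  · rintro ⟨p, hp, rfl, t', ht', hw'⟩
    obtain ⟨k, hk, rfl⟩ := (PySem.List.mem_enumerate_iff _ _ _).1 hp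
    refine ⟨k, hk, by simp, t', ht', ?_⟩
    have ht'r := hPre.1 _ (List.getElem_mem hk) t' ht'
    have h1' := pvNode_range edges.length t' ht'r.1 ht'r.2
    have h2' := pvNode_range edges.length t h0 h1
    omega
  · rintro ⟨u, hu, rfl, t', ht', hw'⟩
    exact ⟨((u : Int), edges[u]), (PySem.List.mem_enumerate_iff _ _ _).2 ⟨u, hu, by simp⟩,
      rfl, t', ht', by rw [hw']⟩

-- ---- port A's BFS ----

-- the inner fold over rev[t] appends the same fresh elements to reachable and to the queue
theorem pvBfsFold (l : List Int) : ∀ (r q : List Int), ∃ fresh : List Int,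
    l.foldl (fun (st : List Int × List Int) s =>
        if s ∈ st.1 then st else (st.1 ++ [s], st.2 ++ [s])) (r, q)
      = (r ++ fresh, q ++ fresh)
    ∧ (∀ x ∈ fresh, x ∈ l ∧ x ∉ r)
    ∧ (∀ x ∈ l, x ∈ r ++ fresh)
    ∧ (r.Nodup → (r ++ fresh).Nodup) := by
  induction l with
  | nil => intro r q; exact ⟨[], by simp⟩
  | cons s l ih =>
    intro r q
    by_cases hs : s ∈ r
    · obtain ⟨fresh, heq, hf, hcov, hnd⟩ := ih r q
      refine ⟨fresh, by simpa [List.foldl_cons, hs] using heq,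
        fun x hx => ⟨List.mem_cons_of_mem _ (hf x hx).1, (hf x hx).2⟩, ?_, hnd⟩
      intro x hx
      rcases List.mem_cons.1 hx with rfl | hx
      · exact List.mem_append.2 (Or.inl hs)
      · exact hcov x hx
    · obtain ⟨fresh, heq, hf, hcov, hnd⟩ := ih (r ++ [s]) (q ++ [s])
      refine ⟨s :: fresh, ?_, ?_, ?_, ?_⟩
      · simpa [List.foldl_cons, hs, List.append_assoc] using heq
      · intro x hx
        rcases List.mem_cons.1 hx with rfl | hx
        · exact ⟨List.mem_cons_self .., hs⟩
        · obtain ⟨h1, h2⟩ := hf x hx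
          exact ⟨List.mem_cons_of_mem _ h1, fun hc => h2 (List.mem_append.2 (Or.inl hc))⟩
      · intro x hx
        rcases List.mem_cons.1 hx with rfl | hx
        · simp
        · have := hcov x hx
          simpa [List.append_assoc] using this
      · intro hr
        have : (r ++ [s]).Nodup := by
          refine List.Nodup.append hr (List.nodup_singleton s) ?_
          intro a ha hb
          rw [List.mem_singleton] at hb
          subst hb; exact hs ha
        simpa [List.append_assoc] using hnd this

-- the BFS invariant
def pvInvA (edges : List (List Int)) (starts : List Int) (r q : List Int) : Prop :=
  (∃ extra, r = PySem.Set.ofList starts ++ extra ∧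
    ∀ x ∈ extra, ∃ u : Nat, u < edges.length ∧ x = (u : Int))
  ∧ r.Nodup
  ∧ (∀ x ∈ q, x ∈ r)
  ∧ (∀ x ∈ r, pvReach edges starts x)
  ∧ (∀ t ∈ r, t ∉ q → ∀ s ∈ PySem.List.pyGetD (pvRevA edges) t [], s ∈ r)

theorem pvLenBound {edges : List (List Int)} {starts : List Int} {r : List Int}
    (hsh : ∃ extra, r = PySem.Set.ofList starts ++ extra ∧
      ∀ x ∈ extra, ∃ u : Nat, u < edges.length ∧ x = (u : Int))
    (hnd : r.Nodup) :
    r.length ≤ (PySem.Set.ofList starts).length + edges.length := by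
  obtain ⟨extra, rfl, hex⟩ := hsh
  have hnd' : extra.Nodup := (List.nodup_append.1 hnd).2.1
  have hsub : extra ⊆ List.map (fun u : Nat => (u : Int)) (List.range edges.length) := by
    intro x hx
    obtain ⟨u, hu, rfl⟩ := hex x hx
    exact List.mem_map.2 ⟨u, List.mem_range.2 hu, rfl⟩
  have hperm := List.subperm_of_subset hnd' hsub
  have := hperm.length_le
  simp only [List.length_map, List.length_range] at this
  simp only [List.length_append]
  omega

theorem pvMemRange {edges : List (List Int)} {starts : List Int} {r : List Int}
    (hPre : Pre_reverse_reachable_py edges starts)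
    (hsh : ∃ extra, r = PySem.Set.ofList starts ++ extra ∧
      ∀ x ∈ extra, ∃ u : Nat, u < edges.length ∧ x = (u : Int))
    {x : Int} (hx : x ∈ r) : -(edges.length : Int) ≤ x ∧ x < (edges.length : Int) := by
  obtain ⟨extra, rfl, hex⟩ := hsh
  rcases List.mem_append.1 hx with h | h
  · exact hPre.2 _ ((PySem.Set.mem_ofList _ _).1 h)
  · obtain ⟨u, hu, rfl⟩ := hex x h
    constructor
    · omega
    · exact_mod_cast hu

theorem pvBfsMain {edges : List (List Int)} {starts : List Int}
    (hPre : Pre_reverse_reachable_py edges starts) :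
    ∀ (fuel : Nat) (r q : List Int), pvInvA edges starts r q →
      q.length + ((PySem.Set.ofList starts).length + edges.length - r.length) < fuel →
      ∃ rf, pvBfsA (pvRevA edges) fuel r q = rf ∧ pvInvA edges starts rf []
        ∧ ∀ x ∈ r, x ∈ rf := by
  intro fuel
  induction fuel with
  | zero => intro r q _ h; omega
  | succ fuel ih =>
    intro r q hInv hm
    obtain ⟨hsh, hnd, hq, hsound, hclosed⟩ := hInv
    match q with
    | [] => exact ⟨r, rfl, ⟨hsh, hnd, by simp, hsound, fun t ht _ => hclosed t ht (by simp)⟩,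
        fun x hx => hx⟩
    | t :: rest =>
      obtain ⟨fresh, heq, hf, hcov, hndf⟩ :=
        pvBfsFold (PySem.List.pyGetD (pvRevA edges) t []) r rest
      have htr : t ∈ r := hq t (by simp)
      have htrange := pvMemRange hPre hsh htr
      have hfreshnode : ∀ x ∈ fresh, ∃ u : Nat, u < edges.length ∧ x = (u : Int) := by
        intro x hx
        obtain ⟨u, hu, rfl, _⟩ := (pvRevA_mem hPre t htrange.1 htrange.2 x).1 (hf x hx).1
        exact ⟨u, hu, rfl⟩
      have hInv' : pvInvA edges starts (r ++ fresh) (rest ++ fresh) := by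
        refine ⟨?_, hndf hnd, ?_, ?_, ?_⟩
        · obtain ⟨extra, rfl, hex⟩ := hsh
          refine ⟨extra ++ fresh, by simp [List.append_assoc], ?_⟩
          intro x hx
          rcases List.mem_append.1 hx with h | h
          · exact hex x h
          · exact hfreshnode x h
        · intro x hx
          rcases List.mem_append.1 hx with h | h
          · exact List.mem_append.2 (Or.inl (hq x (by simp [h])))
          · exact List.mem_append.2 (Or.inr h)
        · intro x hx
          rcases List.mem_append.1 hx with h | h
          · exact hsound x h
          · obtain ⟨u, hu, rfl, t', ht', hw'⟩ :=
              (pvRevA_mem hPre t htrange.1 htrange.2 x).1 (hf x h).1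
            exact pvReach.step hu ht' hw' (hsound t htr)
        · intro t' ht' hnq s hs
          by_cases hfr : t' ∈ fresh
          · exact absurd (List.mem_append.2 (Or.inr hfr)) hnq
          have ht'r : t' ∈ r := by
            rcases List.mem_append.1 ht' with h | h
            · exact h
            · exact absurd h hfr
          by_cases hte : t' = t
          · subst hte; exact hcov s hs
          · have hnrest : t' ∉ rest := fun hc =>
              hnq (List.mem_append.2 (Or.inl hc))
            have : t' ∉ t :: rest := by simp [hte, hnrest]
            exact List.mem_append.2 (Or.inl (hclosed t' ht'r this s hs))
      have hlen' : (r ++ fresh).length ≤ (PySem.Set.ofList starts).length + edges.length :=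
        pvLenBound hInv'.1 hInv'.2.1
      have hlen : r.length ≤ (PySem.Set.ofList starts).length + edges.length :=
        pvLenBound hsh hnd
      have hm' : (rest ++ fresh).length +
          ((PySem.Set.ofList starts).length + edges.length - (r ++ fresh).length) < fuel := by
        simp only [List.length_append] at *
        simp only [List.length_cons] at hm
        omega
      obtain ⟨rf, hrf, hInvf, hsub⟩ := ih (r ++ fresh) (rest ++ fresh) hInv' hm'
      refine ⟨rf, ?_, hInvf, fun x hx => hsub x (List.mem_append.2 (Or.inl hx))⟩
      show pvBfsA (pvRevA edges) fuel
        ((PySem.List.pyGetD (pvRevA edges) t []).foldl _ (r, rest)).1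
        ((PySem.List.pyGetD (pvRevA edges) t []).foldl _ (r, rest)).2 = rf
      rw [heq]
      exact hrf

theorem pvA_char {edges : List (List Int)} {starts : List Int}
    (hPre : Pre_reverse_reachable_py edges starts) :
    ∃ rf, pvBfsA (pvRevA edges) (starts.length + edges.length + 1)
        (PySem.Set.ofList starts) starts = rf
      ∧ rf.Nodup ∧ (∀ x, x ∈ rf ↔ pvReach edges starts x) := by
  have hInv0 : pvInvA edges starts (PySem.Set.ofList starts) starts := by
    refine ⟨⟨[], by simp, by simp⟩, PySem.Set.nodup_ofList _, ?_, ?_, ?_⟩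
    · intro x hx; exact (PySem.Set.mem_ofList _ _).2 hx
    · intro x hx; exact pvReach.base ((PySem.Set.mem_ofList _ _).1 hx)
    · intro t ht hnq; exact absurd ((PySem.Set.mem_ofList _ _).1 ht) hnq
  have hlen0 : (PySem.Set.ofList starts).length ≤ starts.length :=
    PySem.Set.length_ofList_le _
  obtain ⟨rf, hrf, hInvf, hsub⟩ := pvBfsMain hPre (starts.length + edges.length + 1)
    (PySem.Set.ofList starts) starts hInv0 (by omega)
  obtain ⟨hsh, hnd, _, hsound, hclosed⟩ := hInvf
  refine ⟨rf, hrf, hnd, fun x => ⟨hsound x, ?_⟩⟩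
  intro hx
  induction hx with
  | @base s hs =>
    exact hsub s ((PySem.Set.mem_ofList _ _).2 hs)
  | @step u t x hu ht heq hreach ihx =>
    have hxrange := pvReach_range hPre hreach
    exact hclosed x ihx (by simp) _
      ((pvRevA_mem hPre x hxrange.1 hxrange.2 _).2 ⟨u, hu, rfl, t, ht, heq⟩)

-- ---- port B's fixpoint sweep ----

-- the initial live array: [False]*n with live[s] = True for each start
theorem pvLiveInit : ∀ (ss : List Int) (lv : List Bool),
    (∀ s ∈ ss, -(lv.length : Int) ≤ s ∧ s < (lv.length : Int)) →
    (ss.foldl (fun lv s => PySem.List.pySetD lv s true) lv).length = lv.length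
    ∧ ∀ w : Nat, w < lv.length →
      ((ss.foldl (fun lv s => PySem.List.pySetD lv s true) lv).getD w false = true
        ↔ lv.getD w false = true ∨ ∃ s ∈ ss, pvNode lv.length s = (w : Int)) := by
  intro ss
  induction ss with
  | nil => intro lv _; exact ⟨rfl, fun w _ => by simp⟩
  | cons s0 ss ih =>
    intro lv hss
    have hs0 := hss s0 (by simp)
    have hset : PySem.List.pySetD lv s0 true = lv.set (pvNode lv.length s0).toNat true :=
      pvPySetD_node _ _ _ hs0.1 hs0.2
    have hk : (pvNode lv.length s0).toNat < lv.length := pvNode_toNat_lt _ _ hs0.1 hs0.2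
    have hlen : (lv.set (pvNode lv.length s0).toNat true).length = lv.length := by simp
    obtain ⟨ihlen, ihmem⟩ := ih (lv.set (pvNode lv.length s0).toNat true)
      (fun s hs => by rw [hlen]; exact hss s (by simp [hs]))
    constructor
    · rw [List.foldl_cons, hset, ihlen, hlen]
    · intro w hw
      rw [List.foldl_cons, hset, ihmem w (by omega), hlen,
        pvGetD_set _ _ _ _ _ hk]
      have hnode := pvNode_range lv.length s0 hs0.1 hs0.2
      by_cases he : w = (pvNode lv.length s0).toNat
      · subst he
        constructor
        · intro _
          exact Or.inr ⟨s0, by simp, by omega⟩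
        · intro _
          simp
      · rw [if_neg he]
        constructor
        · rintro (h | ⟨s, hs, hsw⟩)
          · exact Or.inl h
          · exact Or.inr ⟨s, by simp [hs], hsw⟩
        · rintro (h | ⟨s, hs, hsw⟩)
          · exact Or.inl h
          · rcases List.mem_cons.1 hs with rfl | hs
            · exact absurd (by omega : w = (pvNode lv.length s).toNat) he
            · exact Or.inr ⟨s, hs, hsw⟩

-- one sweep, all invariants at once: the reachable part grows by 'fresh' node ids, the live
-- array stays the node-id indicator of the reachable part, soundness and Nodup are
-- preserved, and an unchanged sweep certifies closure.
theorem pvPassMain {edges : List (List Int)} {starts : List Int}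
    (hPre : Pre_reverse_reachable_py edges starts) :
    ∀ (ps : List (Int × List Int)),
    (∀ p ∈ ps, ∃ (u : Nat) (hu : u < edges.length), p.1 = (u : Int) ∧ p.2 = edges[u]) →
    ∀ (r : List Int) (lv : List Bool) (ch : Bool),
    lv.length = edges.length →
    (∀ w : Nat, w < edges.length →
      (lv.getD w false = true ↔ ∃ x ∈ r, pvNode edges.length x = (w : Int))) →
    (∀ x ∈ r, pvReach edges starts x) →
    ∃ fresh lv',
      ps.foldl (fun (st : (List Int × List Bool) × Bool) p =>
          if p.1 ∉ st.1.1 ∧ ∃ t ∈ p.2, PySem.List.pyGetD st.1.2 t false = true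
          then ((st.1.1 ++ [p.1], PySem.List.pySetD st.1.2 p.1 true), true) else st)
        ((r, lv), ch)
        = ((r ++ fresh, lv'), ch || !fresh.isEmpty)
      ∧ lv'.length = edges.length
      ∧ (∀ w : Nat, w < edges.length →
          (lv'.getD w false = true ↔ ∃ x ∈ r ++ fresh, pvNode edges.length x = (w : Int)))
      ∧ (∀ x ∈ fresh, ∃ u : Nat, u < edges.length ∧ x = (u : Int))
      ∧ (∀ x ∈ r ++ fresh, pvReach edges starts x)
      ∧ (fresh = [] → lv' = lv ∧
          ∀ p ∈ ps, p.1 ∈ r ∨ ∀ t ∈ p.2, ¬ PySem.List.pyGetD lv t false = true)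
      ∧ (r.Nodup → (r ++ fresh).Nodup) := by
  intro ps
  induction ps with
  | nil =>
    intro _ r lv ch hlen hliv hsound
    exact ⟨[], lv, by simp, hlen, by simpa using hliv, by simp, by simpa using hsound,
      fun _ => ⟨rfl, by simp⟩, by simp⟩
  | cons p ps ih =>
    intro hps r lv ch hlen hliv hsound
    rw [List.foldl_cons]
    by_cases hc : p.1 ∉ r ∧ ∃ t ∈ p.2, PySem.List.pyGetD lv t false = true
    · rw [if_pos hc]
      obtain ⟨u, hu, hp1, hp2⟩ := hps p (by simp)
      have hun : (pvNode lv.length p.1).toNat = u := by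
        rw [hlen, hp1, pvNode_natCast]
        exact Int.toNat_natCast u
      have hset : PySem.List.pySetD lv p.1 true = lv.set u true := by
        rw [pvPySetD_node _ _ _ (by rw [hlen, hp1]; omega)
          (by rw [hlen, hp1]; exact_mod_cast hu), hun]
      have hlen' : (lv.set u true).length = edges.length := by simp [hlen]
      have hliv' : ∀ w : Nat, w < edges.length →
          ((lv.set u true).getD w false = true ↔
            ∃ x ∈ r ++ [p.1], pvNode edges.length x = (w : Int)) := by
        intro w hw
        rw [pvGetD_set _ _ _ _ _ (by omega : u < lv.length)]
        by_cases he : w = u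
        · subst he
          rw [if_pos rfl]
          constructor
          · intro _
            exact ⟨p.1, List.mem_append.2 (Or.inr (by simp)), by rw [hp1, pvNode_natCast]⟩
          · intro _; rfl
        · rw [if_neg he, hliv w hw]
          constructor
          · rintro ⟨x, hx, hxe⟩
            exact ⟨x, List.mem_append.2 (Or.inl hx), hxe⟩
          · rintro ⟨x, hx, hxe⟩
            rcases List.mem_append.1 hx with h | h
            · exact ⟨x, h, hxe⟩
            · rw [List.mem_singleton.1 h, hp1, pvNode_natCast] at hxe
              exact absurd (by exact_mod_cast hxe.symm) he
      have hsound' : ∀ x ∈ r ++ [p.1], pvReach edges starts x := by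
        intro x hx
        rcases List.mem_append.1 hx with h | h
        · exact hsound x h
        · obtain ⟨t, ht, htl⟩ := hc.2
          have htr := hPre.1 _ (hp2 ▸ List.getElem_mem hu) t ht
          rw [pvPyGetD_node _ _ _ (by omega) (by omega), hlen] at htl
          have hwt : (pvNode edges.length t).toNat < edges.length :=
            pvNode_toNat_lt _ _ htr.1 htr.2
          obtain ⟨y, hy, hyt⟩ := (hliv _ hwt).1 htl
          have hnt := pvNode_range edges.length t htr.1 htr.2
          rw [List.mem_singleton.1 h, hp1]
          exact pvReach.step hu (hp2 ▸ ht) (by omega) (hsound y hy)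
      obtain ⟨fresh', lv', heq, h0, h1, h2, h3, _, h5⟩ :=
        ih (fun q hq => hps q (by simp [hq])) (r ++ [p.1]) (lv.set u true) true
          hlen' hliv' hsound'
      refine ⟨p.1 :: fresh', lv', ?_, h0, ?_, ?_, ?_, ?_, ?_⟩
      · rw [hset, heq]
        simp [List.append_assoc]
      · intro w hw
        rw [h1 w hw]
        simp [List.append_assoc]
      · intro x hx
        rcases List.mem_cons.1 hx with rfl | hx
        · exact ⟨u, hu, hp1⟩
        · exact h2 x hx
      · intro x hx
        have : x ∈ (r ++ [p.1]) ++ fresh' := by simpa [List.append_assoc] using hx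
        exact h3 x this
      · intro h; simp at h
      · intro hr
        have : (r ++ [p.1]).Nodup := by
          refine List.Nodup.append hr (List.nodup_singleton p.1) ?_
          intro a ha hb
          rw [List.mem_singleton] at hb
          subst hb; exact hc.1 ha
        simpa [List.append_assoc] using h5 this
    · rw [if_neg hc]
      obtain ⟨fresh, lv', heq, h0, h1, h2, h3, h4, h5⟩ :=
        ih (fun q hq => hps q (by simp [hq])) r lv ch hlen hliv hsound
      refine ⟨fresh, lv', heq, h0, h1, h2, h3, ?_, h5⟩
      intro h
      refine ⟨(h4 h).1, ?_⟩
      intro q hq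
      rcases List.mem_cons.1 hq with rfl | hq
      · by_cases hp : q.1 ∈ r
        · exact Or.inl hp
        · exact Or.inr (fun t ht htl => hc ⟨hp, t, ht, htl⟩)
      · exact (h4 h).2 q hq

def pvInvB (edges : List (List Int)) (starts : List Int) (r : List Int) (lv : List Bool) : Prop :=
  (∃ extra, r = PySem.Set.ofList starts ++ extra ∧
    ∀ x ∈ extra, ∃ u : Nat, u < edges.length ∧ x = (u : Int))
  ∧ r.Nodup
  ∧ (∀ x ∈ r, pvReach edges starts x)
  ∧ lv.length = edges.length
  ∧ (∀ w : Nat, w < edges.length →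
      (lv.getD w false = true ↔ ∃ x ∈ r, pvNode edges.length x = (w : Int)))

theorem pvEnumNodes (edges : List (List Int)) :
    ∀ p ∈ PySem.List.enumerate edges 0,
      ∃ (u : Nat) (hu : u < edges.length), p.1 = (u : Int) ∧ p.2 = edges[u] := by
  intro p hp
  obtain ⟨k, hk, rfl⟩ := (PySem.List.mem_enumerate_iff _ _ _).1 hp
  exact ⟨k, hk, by simp, rfl⟩

theorem pvLoopMain {edges : List (List Int)} {starts : List Int}
    (hPre : Pre_reverse_reachable_py edges starts) :
    ∀ (fuel : Nat) (r : List Int) (lv : List Bool), pvInvB edges starts r lv →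
      (PySem.Set.ofList starts).length + edges.length < fuel + r.length →
      ∃ rf, pvLoopB edges fuel (r, lv) = rf
        ∧ rf.Nodup ∧ (∀ x ∈ rf, pvReach edges starts x)
        ∧ (∀ x ∈ r, x ∈ rf)
        ∧ ∀ (u : Nat) (hu : u < edges.length),
            (∃ t ∈ edges[u], ∃ x ∈ rf, pvNode edges.length t = pvNode edges.length x) →
            ((u : Nat) : Int) ∈ rf := by
  intro fuel
  induction fuel with
  | zero =>
    intro r lv hInv hm
    have := pvLenBound hInv.1 hInv.2.1
    omega
  | succ fuel ih =>
    intro r lv hInv hm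
    obtain ⟨fresh, lv', heq, hlen', hliv', hfnode, hsound', hstop, hndf⟩ :=
      pvPassMain hPre (PySem.List.enumerate edges 0) (pvEnumNodes edges) r lv false
        hInv.2.2.2.1 hInv.2.2.2.2 hInv.2.2.1
    match hfr : fresh with
    | [] =>
      subst hfr
      refine ⟨r, ?_, hInv.2.1, hInv.2.2.1, fun x hx => hx, ?_⟩
      · show (if (pvPassB edges ((r, lv), false)).2 then
            pvLoopB edges fuel (pvPassB edges ((r, lv), false)).1
          else (pvPassB edges ((r, lv), false)).1.1) = r
        rw [pvPassB, heq]
        simp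
      · rintro u hu ⟨t, ht, x, hx, hxeq⟩
        have hp : ((u : Int), edges[u]) ∈ PySem.List.enumerate edges 0 :=
          (PySem.List.mem_enumerate_iff _ _ _).2 ⟨u, hu, by simp⟩
        rcases (hstop rfl).2 _ hp with h | h
        · exact h
        · exfalso
          have htr := hPre.1 _ (List.getElem_mem hu) t ht
          refine h t ht ?_
          rw [pvPyGetD_node _ _ _ (by rw [hInv.2.2.2.1]; omega)
            (by rw [hInv.2.2.2.1]; omega), hInv.2.2.2.1]
          have hwt : (pvNode edges.length t).toNat < edges.length :=
            pvNode_toNat_lt _ _ htr.1 htr.2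
          have hnt := pvNode_range edges.length t htr.1 htr.2
          exact (hInv.2.2.2.2 _ hwt).2 ⟨x, hx, by omega⟩
    | x0 :: fresh' =>
      subst hfr
      have hInv' : pvInvB edges starts (r ++ (x0 :: fresh')) lv' := by
        refine ⟨?_, hndf hInv.2.1, hsound', hlen', hliv'⟩
        obtain ⟨extra, hrw, hex⟩ := hInv.1
        refine ⟨extra ++ (x0 :: fresh'), by rw [hrw, List.append_assoc], ?_⟩
        intro x hx
        rcases List.mem_append.1 hx with h | h
        · exact hex x h
        · exact hfnode x h
      obtain ⟨rf, hrf, hnd, hsnd, hsub, hcl⟩ := ih (r ++ (x0 :: fresh')) lv' hInv'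
        (by simp only [List.length_append, List.length_cons]; omega)
      refine ⟨rf, ?_, hnd, hsnd, fun x hx => hsub x (List.mem_append.2 (Or.inl hx)), hcl⟩
      show (if (pvPassB edges ((r, lv), false)).2 then
          pvLoopB edges fuel (pvPassB edges ((r, lv), false)).1
        else (pvPassB edges ((r, lv), false)).1.1) = rf
      rw [pvPassB, heq]
      simpa using hrf

theorem pvB_char {edges : List (List Int)} {starts : List Int}
    (hPre : Pre_reverse_reachable_py edges starts) :
    ∃ rf, pvLoopB edges (edges.length + 1)
        (PySem.Set.ofList starts,
          starts.foldl (fun lv s => PySem.List.pySetD lv s true)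
            (List.replicate edges.length false)) = rf
      ∧ rf.Nodup ∧ (∀ x, x ∈ rf ↔ pvReach edges starts x) := by
  have hrep : (List.replicate edges.length false).length = edges.length := by simp
  obtain ⟨hlen0, hmem0⟩ := pvLiveInit starts (List.replicate edges.length false)
    (fun x hx => by rw [hrep]; exact hPre.2 x hx)
  have hInv0 : pvInvB edges starts (PySem.Set.ofList starts)
      (starts.foldl (fun lv s => PySem.List.pySetD lv s true)
        (List.replicate edges.length false)) := by
    refine ⟨⟨[], by simp, by simp⟩, PySem.Set.nodup_ofList _,
      fun x hx => pvReach.base ((PySem.Set.mem_ofList _ _).1 hx), by rw [hlen0, hrep], ?_⟩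
    intro w hw
    rw [hmem0 w (by rw [hrep]; omega), hrep]
    have hfalse : (List.replicate edges.length false).getD w false = false := by
      rw [List.getD_eq_getElem?_getD]
      simp [hw]
    rw [hfalse]
    simp only [Bool.false_eq_true, false_or]
    constructor
    · rintro ⟨x, hx, hxe⟩
      exact ⟨x, (PySem.Set.mem_ofList _ _).2 hx, hxe⟩
    · rintro ⟨x, hx, hxe⟩
      exact ⟨x, (PySem.Set.mem_ofList _ _).1 hx, hxe⟩
  obtain ⟨rf, hrf, hnd, hsnd, hsub, hcl⟩ := pvLoopMain hPre (edges.length + 1)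
    (PySem.Set.ofList starts) _ hInv0 (by omega)
  refine ⟨rf, hrf, hnd, fun x => ⟨hsnd x, ?_⟩⟩
  intro hx
  induction hx with
  | @base s hs => exact hsub s ((PySem.Set.mem_ofList _ _).2 hs)
  | @step u t x hu ht heq _ ihx => exact hcl u hu ⟨t, ht, x, ihx, heq⟩

-- ---- sorted lists with the same elements are equal ----

theorem pvSortedEq (a b : List Int) (ha : a.Nodup) (hb : b.Nodup)
    (h : ∀ x, x ∈ a ↔ x ∈ b) :
    PySem.List.sorted a (fun x => x) false = PySem.List.sorted b (fun x => x) false := by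
  have hperm : a.Perm b := (List.perm_ext_iff_of_nodup ha hb).2 h
  have hsp : (PySem.List.sorted b (fun x => x) false).Perm b := PySem.List.sorted_perm ..
  have hle : (PySem.List.sorted b (fun x => x) false).Pairwise (fun x y => x ≤ y) :=
    PySem.List.sorted_pairwise ..
  have hndb : (PySem.List.sorted b (fun x => x) false).Nodup := hsp.nodup_iff.2 hb
  have hlt : (PySem.List.sorted b (fun x => x) false).Pairwise (fun x y : Int => x < y) :=
    (hle.and hndb).imp (fun h => lt_of_le_of_ne h.1 h.2)
  exact PySem.List.sorted_eq_of_perm_of_pairwise_lt a _ (fun x => x)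
    (hsp.trans hperm.symm) hlt

-- ===== VERDICT (by name: the statement is the Claim_ definition above) =====
theorem reverse_reachable_py_spec : Claim_equal_reverse_reachable_py := by
  intro edges starts _ hPre
  unfold Spec_reverse_reachable_py reverse_reachable_py reverse_reachable_py_alt
  obtain ⟨rA, hA, hAnd, hAmem⟩ := pvA_char hPre
  obtain ⟨rB, hB, hBnd, hBmem⟩ := pvB_char hPre
  simp only [hA, hB]
  exact pvSortedEq rA rB hAnd hBnd (fun x => (hAmem x).trans (hBmem x).symm)
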